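-- pv_equiv track=rewrite | github.com/mahmoudmhashem/ArSLr | dynamic_words/training stage/fill None using Linear Regression.py | find_s_e
-- ===== SOURCE A (Python) =====
-- def find_s_e(vec):
--     s, e = 0, len(vec)
--     s_not_assigned, e_not_assigned = True, True
--     i = 0
--     while (s_not_assigned or e_not_assigned) and i< len(vec):
--         if s_not_assigned and vec[i] != 0:
--             s = i
--             s_not_assigned = False
--         if e_not_assigned and vec[len(vec)-i-1] != 0:
--             e = len(vec)-i
--             e_not_assigned = False
--         i+=1
--     return s, e
-- ===== SOURCE B (Python) =====
-- def find_s_e(vec):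
--     nz = [i for i, x in enumerate(vec) if x != 0]
--     if nz:
--         return nz[0], nz[-1] + 1
--     return 0, len(vec)
-- ===== Notes on version B (the rewrite author's own statement) =====
-- stated objective: simpler
-- what changed: Replaces the fused two-ended early-exit scan with flag variables by a single forward pass that materializes the nonzero-index list and reads its first and last entries.
import Mathlib
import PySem

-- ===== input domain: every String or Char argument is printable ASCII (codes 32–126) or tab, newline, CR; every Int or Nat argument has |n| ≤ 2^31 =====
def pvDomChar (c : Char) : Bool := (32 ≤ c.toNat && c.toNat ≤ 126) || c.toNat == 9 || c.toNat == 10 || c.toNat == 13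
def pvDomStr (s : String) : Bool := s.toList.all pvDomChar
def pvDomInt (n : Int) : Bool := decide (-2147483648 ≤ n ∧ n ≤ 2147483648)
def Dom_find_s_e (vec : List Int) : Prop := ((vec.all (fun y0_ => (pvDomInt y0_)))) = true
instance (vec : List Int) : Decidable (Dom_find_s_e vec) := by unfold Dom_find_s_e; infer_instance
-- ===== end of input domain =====

-- B replaces A's fused two-ended early-exit scan (with not-assigned flags) by one forward
-- pass that materializes the nonzero-index list and reads its endpoints (objective: simpler).

-- ===== PORT A =====
-- Literal transliteration of A's while loop; the guard `i < len(vec)` keeps both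
-- indices i and len(vec)-i-1 in range, so `getD` is exact for Python's vec[...] here.
def findSELoop (vec : List Int) (s e : Int) (sna ena : Bool) (i : Nat) : Int × Int :=
  if h : (sna || ena) = true ∧ i < vec.length then
    let s' := if sna && decide (vec.getD i 0 ≠ 0) then (i : Int) else s
    let sna' := if sna && decide (vec.getD i 0 ≠ 0) then false else sna
    let e' := if ena && decide (vec.getD (vec.length - i - 1) 0 ≠ 0) then ((vec.length - i : Nat) : Int) else e
    let ena' := if ena && decide (vec.getD (vec.length - i - 1) 0 ≠ 0) then false else ena
    findSELoop vec s' e' sna' ena' (i + 1)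
  else (s, e)
termination_by vec.length - i
decreasing_by omega


def find_s_e (vec : List Int) : Int × Int :=
  findSELoop vec 0 (vec.length : Int) true true 0

-- ===== PORT B =====
-- Transliteration of Source B: nz = [i for i, x in enumerate(vec) if x != 0];
-- if nz: return nz[0], nz[-1] + 1; else: return 0, len(vec)
def find_s_e_alt (vec : List Int) : Int × Int :=
  let nz : List Int := ((PySem.List.enumerate vec).filter (fun p => decide (p.2 ≠ 0))).map (fun p => p.1)
  match nz with
  | [] => (0, (vec.length : Int))
  | h :: t => (h, (h :: t).getLastD 0 + 1)

-- ===== PRECONDITION & SPEC =====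
def Spec_find_s_e (vec : List Int) (out : Int × Int) : Prop := out = find_s_e_alt vec
instance (vec : List Int) (out : Int × Int) : Decidable (Spec_find_s_e vec out) := by unfold Spec_find_s_e; infer_instance

-- ===== CLAIM (what is proved, stated in full; the proofs are below) =====
def Claim_equal_find_s_e : Prop := ∀ (vec : List Int), Dom_find_s_e vec → Spec_find_s_e vec (find_s_e vec)

-- ===== LEMMAS AND PROOFS =====

def firstNZ : List Int → Option Nat
  | [] => none
  | x :: xs => if x ≠ 0 then some 0 else (firstNZ xs).map (· + 1)

def lastNZ : List Int → Option Nat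
  | [] => none
  | x :: xs => match lastNZ xs with
    | some j => some (j + 1)
    | none => if x ≠ 0 then some 0 else none

theorem lastNZ_concat (l : List Int) (x : Int) :
    lastNZ (l ++ [x]) = if x ≠ 0 then some l.length else lastNZ l := by
  induction l with
  | nil => by_cases hx : x ≠ 0 <;> simp [lastNZ, hx]
  | cons y ys ih =>
    simp only [List.cons_append, lastNZ, ih, List.length_cons]
    by_cases hx : x ≠ 0 <;> simp [hx] <;> cases lastNZ ys <;> simp

theorem map_shift (o : Option Nat) (i : Nat) :
    Option.map (fun j : Nat => ((j + i : Nat) : Int)) (o.map (· + 1))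
      = Option.map (fun j : Nat => ((j + (i + 1) : Nat) : Int)) o := by
  cases o with
  | none => rfl
  | some j => simp only [Option.map_some, Option.some.injEq]; congr 1; omega

theorem findSELoop_ff (vec : List Int) (s e : Int) (i : Nat) :
    findSELoop vec s e false false i = (s, e) := by
  unfold findSELoop; simp

theorem findSELoop_tf (vec : List Int) (s e : Int) (i : Nat) :
    findSELoop vec s e true false i
      = (((firstNZ (vec.drop i)).map (fun j : Nat => ((j + i : Nat) : Int))).getD s, e) := by
  by_cases h : i < vec.length
  · have hg : vec.getD i 0 = vec[i] := by
      simp [List.getD_eq_getElem?_getD, List.getElem?_eq_getElem h]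
    rw [findSELoop, dif_pos (by simp [h])]
    rw [List.drop_eq_getElem_cons h]
    by_cases hx : vec[i] ≠ 0
    · simp [List.getElem?_eq_getElem h, hx, findSELoop_ff, firstNZ]
    · push_neg at hx
      simp only [hg, hx, ne_eq, not_true_eq_false, decide_false, Bool.and_false, Bool.false_and,
        if_false, Bool.false_eq_true]
      rw [findSELoop_tf vec s e (i+1)]
      simp only [firstNZ, hx, ne_eq, not_true_eq_false, if_false, reduceIte]
      rw [map_shift]
  · rw [findSELoop]
    simp [h, List.drop_eq_nil_of_le (by omega : vec.length ≤ i), firstNZ]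
termination_by vec.length - i
decreasing_by omega

theorem findSELoop_ft (vec : List Int) (s e : Int) (i : Nat) :
    findSELoop vec s e false true i
      = (s, ((lastNZ (vec.take (vec.length - i))).map (fun j : Nat => ((j + 1 : Nat) : Int))).getD e) := by
  by_cases h : i < vec.length
  · have hlt : vec.length - i - 1 < vec.length := by omega
    have htake : vec.take (vec.length - i) = vec.take (vec.length - i - 1) ++ [vec[vec.length - i - 1]] := by
      conv_lhs => rw [show vec.length - i = (vec.length - i - 1) + 1 by omega]
      rw [List.take_succ]
      simp [List.getElem?_eq_getElem hlt]
    rw [findSELoop, dif_pos (by simp [h])]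
    by_cases hy : vec[vec.length - i - 1] ≠ 0
    · rw [htake, lastNZ_concat]
      simp [List.getElem?_eq_getElem hlt, hy, findSELoop_ff, List.length_take, Prod.mk.injEq]
      omega
    · push_neg at hy
      have hg2 : vec.getD (vec.length - i - 1) 0 = vec[vec.length - i - 1] := by
        simp [List.getD_eq_getElem?_getD, List.getElem?_eq_getElem hlt]
      simp only [hg2, hy, ne_eq, not_true_eq_false, decide_false, Bool.and_false, Bool.false_and,
        if_false, Bool.false_eq_true, reduceIte]
      rw [findSELoop_ft vec s e (i+1), htake, lastNZ_concat]
      simp [hy, show vec.length - (i+1) = vec.length - i - 1 from by omega]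
  · rw [findSELoop]
    simp [h, show vec.length - i = 0 from by omega, lastNZ]
termination_by vec.length - i
decreasing_by omega

theorem findSELoop_tt (vec : List Int) (s e : Int) (i : Nat) :
    findSELoop vec s e true true i
      = (((firstNZ (vec.drop i)).map (fun j : Nat => ((j + i : Nat) : Int))).getD s,
         ((lastNZ (vec.take (vec.length - i))).map (fun j : Nat => ((j + 1 : Nat) : Int))).getD e) := by
  by_cases h : i < vec.length
  · have hlt : vec.length - i - 1 < vec.length := by omega
    have hg : vec.getD i 0 = vec[i] := by
      simp [List.getD_eq_getElem?_getD, List.getElem?_eq_getElem h]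
    have hg2 : vec.getD (vec.length - i - 1) 0 = vec[vec.length - i - 1] := by
      simp [List.getD_eq_getElem?_getD, List.getElem?_eq_getElem hlt]
    have htake : vec.take (vec.length - i) = vec.take (vec.length - i - 1) ++ [vec[vec.length - i - 1]] := by
      conv_lhs => rw [show vec.length - i = (vec.length - i - 1) + 1 by omega]
      rw [List.take_succ]
      simp [List.getElem?_eq_getElem hlt]
    have hdrop := List.drop_eq_getElem_cons h
    rw [findSELoop, dif_pos (by simp [h])]
    by_cases hx : vec[i] ≠ 0 <;> by_cases hy : vec[vec.length - i - 1] ≠ 0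
    · rw [hdrop, htake, lastNZ_concat]
      simp [List.getElem?_eq_getElem h, List.getElem?_eq_getElem hlt, hx, hy, findSELoop_ff,
        firstNZ, List.length_take, Prod.mk.injEq]
      omega
    · push_neg at hy
      simp only [hg, hg2, hx, hy, ne_eq, not_true_eq_false, decide_false, decide_true,
        Bool.and_false, Bool.and_true, Bool.true_and, if_false, if_true, Bool.false_eq_true,
        reduceIte, not_false_eq_true]
      rw [findSELoop_ft vec (i : Int) e (i+1), hdrop, htake, lastNZ_concat]
      simp [hx, hy, firstNZ, show vec.length - (i+1) = vec.length - i - 1 from by omega]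
    · push_neg at hx
      simp only [hg, hg2, hx, hy, ne_eq, not_true_eq_false, decide_false, decide_true,
        Bool.and_false, Bool.and_true, Bool.true_and, if_false, if_true, Bool.false_eq_true,
        reduceIte, not_false_eq_true]
      rw [findSELoop_tf vec s ((vec.length - i : Nat) : Int) (i+1)]
      rw [Prod.mk.injEq]
      constructor
      · rw [hdrop]
        simp only [firstNZ, hx, ne_eq, not_true_eq_false, if_false, reduceIte]
        rw [map_shift]
      · rw [htake, lastNZ_concat]
        simp [hy, List.length_take]
        omega
    · push_neg at hx; push_neg at hy
      simp only [hg, hg2, hx, hy, ne_eq, not_true_eq_false, decide_false,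
        Bool.and_false, if_false, Bool.false_eq_true, reduceIte]
      rw [findSELoop_tt vec s e (i+1)]
      rw [Prod.mk.injEq]
      constructor
      · rw [hdrop]
        simp only [firstNZ, hx, ne_eq, not_true_eq_false, if_false, reduceIte]
        rw [map_shift]
      · rw [htake, lastNZ_concat]
        simp [hy, show vec.length - (i+1) = vec.length - i - 1 from by omega]
  · rw [findSELoop]
    simp [h, show vec.length - i = 0 from by omega,
      List.drop_eq_nil_of_le (by omega : vec.length ≤ i), firstNZ, lastNZ]
termination_by vec.length - i
decreasing_by omega

def nzList (vec : List Int) (k : Int) : List Int :=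
  ((PySem.List.enumerate vec k).filter (fun p => decide (p.2 ≠ 0))).map (fun p => p.1)

theorem nzList_head? (vec : List Int) (k : Int) :
    (nzList vec k).head? = (firstNZ vec).map (fun j : Nat => (j : Int) + k) := by
  induction vec generalizing k with
  | nil => simp [nzList, firstNZ, PySem.List.enumerate]
  | cons x xs ih =>
    simp only [nzList, PySem.List.enumerate_cons, List.filter_cons]
    by_cases hx : x ≠ 0
    · simp [hx, firstNZ]
    · push_neg at hx
      simp only [hx, ne_eq, not_true_eq_false, decide_false, if_false, Bool.false_eq_true]
      have hxs := ih (k + 1)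
      simp only [nzList] at hxs
      rw [hxs]
      simp only [firstNZ, hx, ne_eq, not_true_eq_false, if_false, reduceIte, Option.map_map]
      cases firstNZ xs with
      | none => simp
      | some j => simp only [Option.map_some, Option.some.injEq, Function.comp]; omega

theorem nzList_getLast? (vec : List Int) (k : Int) :
    (nzList vec k).getLast? = (lastNZ vec).map (fun j : Nat => (j : Int) + k) := by
  induction vec generalizing k with
  | nil => simp [nzList, lastNZ, PySem.List.enumerate]
  | cons x xs ih =>
    simp only [nzList, PySem.List.enumerate_cons]
    have hxs := ih (k + 1)
    simp only [nzList] at hxs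
    by_cases hx : x ≠ 0
    · rw [List.filter_cons_of_pos (by simp [hx]), List.map_cons]
      rw [show ((k, x).1 :: (((PySem.List.enumerate xs (k+1)).filter
            (fun p => decide (p.2 ≠ 0))).map (fun p => p.1)))
          = [(k,x).1] ++ (((PySem.List.enumerate xs (k+1)).filter
            (fun p => decide (p.2 ≠ 0))).map (fun p => p.1)) from rfl,
        List.getLast?_append, hxs]
      cases hls : lastNZ xs with
      | none => simp [lastNZ, hls, hx]
      | some j => simp [lastNZ, hls]; omega
    · push_neg at hx
      rw [List.filter_cons_of_neg (by simp [hx])]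
      rw [hxs]
      cases hls : lastNZ xs with
      | none => simp [lastNZ, hls, hx]
      | some j => simp [lastNZ, hls]; omega

-- A in closed form: first / last nonzero index with the all-zero defaults
theorem find_s_e_closed (vec : List Int) :
    find_s_e vec = (((firstNZ vec).map (fun j : Nat => (j : Int))).getD 0,
                    ((lastNZ vec).map (fun j : Nat => ((j + 1 : Nat) : Int))).getD (vec.length : Int)) := by
  unfold find_s_e
  rw [findSELoop_tt]
  simp

-- ===== VERDICT (by name: the statement is the Claim_ definition above) =====
theorem find_s_e_spec : Claim_equal_find_s_e := by
  intro vec _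
  unfold Spec_find_s_e
  rw [find_s_e_closed]
  unfold find_s_e_alt
  have hh := nzList_head? vec 0
  have hl := nzList_getLast? vec 0
  simp only [nzList] at hh hl
  cases hnz : ((PySem.List.enumerate vec 0).filter (fun p => decide (p.2 ≠ 0))).map (fun p => p.1) with
  | nil =>
    rw [hnz] at hh hl
    simp only [List.head?_nil] at hh
    cases hf : firstNZ vec with
    | some j => rw [hf] at hh; simp at hh
    | none =>
      simp only [List.getLast?_nil] at hl
      cases hg : lastNZ vec with
      | some j => rw [hg] at hl; simp at hl
      | none => simp [hf, hg]
  | cons h t =>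
    rw [hnz] at hh hl
    simp only [List.head?_cons] at hh
    cases hf : firstNZ vec with
    | none => rw [hf] at hh; simp at hh
    | some a =>
      rw [hf] at hh
      cases hg : lastNZ vec with
      | none =>
        rw [hg] at hl; simp only [Option.map_none] at hl
        rw [List.getLast?_eq_none_iff] at hl
        simp at hl
      | some b =>
        rw [hg] at hl
        simp only [Option.map_some, Option.some.injEq] at hh
        have hlast : (h :: t).getLastD 0 = (b : Int) := by
          have h2 : (h :: t).getLast? = some ((b : Int) + 0) := hl
          simp only [List.getLastD_eq_getLast?, h2]
          simp
        simp only [Option.map_some, Option.getD_some, hlast]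
        rw [Prod.mk.injEq]
        constructor
        · omega
        · rfl
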